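-- pv_equiv track=rewrite | github.com/romain22222/info002-tp2 | main.py | messageToBits
-- ===== SOURCE A (Python) =====
-- def messageToBits(message: str):
-- 	bits = []
-- 	ml = len(message)
-- 	countEncode = 0
-- 	while ml > 255:
-- 		bits.extend([1 for _ in range(8)])
-- 		ml >>= 8
-- 		countEncode += 1
-- 	ml = len(message)
-- 	bits.extend([int(b) for b in bin(ml)[2:].zfill(8 * (countEncode + 1))])
-- 	for char in message:
-- 		bits.extend([int(b) for b in bin(ord(char))[2:].zfill(8)])
-- 	return bits
-- ===== SOURCE B (Python) =====
-- def messageToBits(message: str):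
-- 	ml = len(message)
-- 	n = max(1, (ml.bit_length() + 7) // 8)
-- 	def pack(lo, hi):
-- 		if hi - lo == 1:
-- 			return ord(message[lo])
-- 		mid = (lo + hi) // 2
-- 		return pack(lo, mid) * 256 ** (hi - mid) + pack(mid, hi)
-- 	acc = (256 ** (n - 1) - 1) * 256 ** n + ml
-- 	if ml:
-- 		acc = acc * 256 ** ml + pack(0, ml)
-- 	return [int(b) for b in bin(acc)[2:].zfill(8 * (2 * n - 1 + ml))]
-- ===== Notes on version B (the rewrite author's own statement) =====
-- stated objective: alternative
-- what changed: B builds the entire output as ONE big integer - the 0xFF filler block and length by a closed-form expression, the character codes by a recursive divide-and-conquer pack - and expands that single number with one global bin()/zfill, instead of A's three separately-shaped sequential bit emissions (0xFF shift loop, zfilled length, per-char 8-bit strings).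
import Mathlib
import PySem

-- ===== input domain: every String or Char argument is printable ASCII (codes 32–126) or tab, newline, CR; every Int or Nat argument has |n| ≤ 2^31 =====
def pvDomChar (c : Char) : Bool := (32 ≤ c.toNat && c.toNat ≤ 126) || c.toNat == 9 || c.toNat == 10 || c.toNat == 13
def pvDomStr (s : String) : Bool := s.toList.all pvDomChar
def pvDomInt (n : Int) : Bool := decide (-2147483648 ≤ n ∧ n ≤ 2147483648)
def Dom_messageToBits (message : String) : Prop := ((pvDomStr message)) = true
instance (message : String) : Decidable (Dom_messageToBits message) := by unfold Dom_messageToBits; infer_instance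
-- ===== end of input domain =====

-- B packs the whole output into ONE big integer by a divide-and-conquer combine and expands it
-- with a single global bin/zfill, instead of A's three separately-shaped bit emissions (objective: alternative).

-- ===== PORT A =====
-- bin(n)[2:] as a list of 0/1 digits, for n > 0
def binRec : Nat → List Int
  | 0 => []
  | n+1 => binRec ((n+1)/2) ++ [(((n+1) % 2 : Nat) : Int)]

-- bin(n)[2:] including bin(0) = "0"
def binStr (n : Nat) : List Int := if n = 0 then [0] else binRec n

-- str.zfill on a digit list
def zfillA (w : Nat) (xs : List Int) : List Int := List.replicate (w - xs.length) 0 ++ xs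

-- A's while-loop: returns (bits emitted, countEncode)
def ffLoop (ml : Nat) : List Int × Nat :=
  if ml > 255 then
    let r := ffLoop (ml >>> 8)
    (List.replicate 8 1 ++ r.1, r.2 + 1)
  else ([], 0)
termination_by ml
decreasing_by simp [Nat.shiftRight_eq_div_pow]; omega

def messageToBits (message : String) : List Int :=
  let ml := message.toList.length
  let r := ffLoop ml
  r.1 ++ zfillA (8 * (r.2 + 1)) (binStr ml)
    ++ message.toList.flatMap (fun c => zfillA 8 (binStr c.toNat))

-- ===== PORT B =====
-- int.bit_length
def bitLenB : Nat → Nat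
  | 0 => 0
  | n+1 => bitLenB ((n+1)/2) + 1

-- B's recursive pack(lo, hi): base-256 value of message[lo:hi]. Exact for lo < hi ≤ length
-- (the only calls B makes; the dite guard is only so that Lean's recursion is total).
def packB (s : List Char) (lo hi : Nat) : Nat :=
  if h : lo + 1 < hi then
    packB s lo ((lo + hi) / 2) * 256 ^ (hi - (lo + hi) / 2) + packB s ((lo + hi) / 2) hi
  else (s.getD lo default).toNat
termination_by hi - lo
decreasing_by all_goals omega

def messageToBits_alt (message : String) : List Int :=
  let ml := message.toList.length
  let n := max 1 ((bitLenB ml + 7) / 8)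
  let acc0 := (256 ^ (n - 1) - 1) * 256 ^ n + ml
  let acc := if ml ≠ 0 then acc0 * 256 ^ ml + packB message.toList 0 ml else acc0
  zfillA (8 * (2 * n - 1 + ml)) (binStr acc)

-- ===== PRECONDITION & SPEC =====
def Spec_messageToBits (message : String) (out : List Int) : Prop := out = messageToBits_alt message
instance (message : String) (out : List Int) : Decidable (Spec_messageToBits message out) := by unfold Spec_messageToBits; infer_instance

-- ===== CLAIM (what is proved, stated in full; the proofs are below) =====
def Claim_equal_messageToBits : Prop := ∀ (message : String), Dom_messageToBits message → Spec_messageToBits message (messageToBits message)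

-- ===== LEMMAS AND PROOFS =====
-- big-endian extraction of the low w bits, peel-style
def extP : Nat → Nat → List Int
  | 0, _ => []
  | w+1, v => extP w (v/2) ++ [((v % 2 : Nat) : Int)]

theorem shiftr8 (n : Nat) : n >>> 8 = n / 256 := by
  simp [Nat.shiftRight_eq_div_pow]

theorem bitLenB_pos_eq (n : Nat) (h : 0 < n) : bitLenB n = bitLenB (n/2) + 1 := by
  cases n with
  | zero => omega
  | succ m => simp [bitLenB]

theorem bl8 (n : Nat) (h : 256 ≤ n) : bitLenB n = bitLenB (n/256) + 8 := by
  have h1 := bitLenB_pos_eq n (by omega)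
  have h2 := bitLenB_pos_eq (n/2) (by omega)
  have h3 := bitLenB_pos_eq (n/2/2) (by omega)
  have h4 := bitLenB_pos_eq (n/2/2/2) (by omega)
  have h5 := bitLenB_pos_eq (n/2/2/2/2) (by omega)
  have h6 := bitLenB_pos_eq (n/2/2/2/2/2) (by omega)
  have h7 := bitLenB_pos_eq (n/2/2/2/2/2/2) (by omega)
  have h8 := bitLenB_pos_eq (n/2/2/2/2/2/2/2) (by omega)
  have he : n/2/2/2/2/2/2/2/2 = n/256 := by omega
  rw [he] at h8
  omega

theorem bitLenB_le (k : Nat) : ∀ n, n < 2^k → bitLenB n ≤ k := by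
  induction k with
  | zero => intro n h; interval_cases n; simp [bitLenB]
  | succ k ih =>
    intro n h
    cases n with
    | zero => simp [bitLenB]
    | succ m =>
      rw [bitLenB_pos_eq (m+1) (by omega)]
      have hp : 2^(k+1) = 2 * 2^k := by ring
      have := ih ((m+1)/2) (by omega)
      omega

theorem bitLenB_lt (n : Nat) : n < 2 ^ bitLenB n := by
  induction n using Nat.strong_induction_on with
  | _ n ih =>
    cases n with
    | zero => simp [bitLenB]
    | succ m =>
      rw [bitLenB_pos_eq (m+1) (by omega)]
      have := ih ((m+1)/2) (by omega)
      have hp : 2^(bitLenB ((m+1)/2) + 1) = 2 * 2^(bitLenB ((m+1)/2)) := by ring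
      omega

theorem bitLenB_pos (n : Nat) (h : 0 < n) : 0 < bitLenB n := by
  rw [bitLenB_pos_eq n h]; omega

theorem ffLoop_count_spec (ml : Nat) :
    bitLenB ml ≤ 8 * ((ffLoop ml).2 + 1) ∧ ((ffLoop ml).2 = 0 ∨ 8 * (ffLoop ml).2 < bitLenB ml) := by
  induction ml using Nat.strong_induction_on with
  | _ ml ih =>
    by_cases h : ml > 255
    · rw [ffLoop, if_pos h, shiftr8]
      have := ih (ml/256) (by omega)
      have hb : bitLenB ml = bitLenB (ml/256) + 8 := bl8 ml (by omega)
      have hp : 0 < bitLenB (ml/256) := bitLenB_pos _ (by omega)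
      simp only
      omega
    · rw [ffLoop, if_neg h]
      have hle : bitLenB ml ≤ 8 := bitLenB_le 8 ml (by norm_num; omega)
      exact ⟨by simpa using hle, Or.inl rfl⟩

theorem ffLoop_bits (ml : Nat) : (ffLoop ml).1 = List.replicate (8 * (ffLoop ml).2) 1 := by
  induction ml using Nat.strong_induction_on with
  | _ ml ih =>
    by_cases h : ml > 255
    · rw [ffLoop, if_pos h]
      have hlt : ml >>> 8 < ml := by rw [shiftr8]; omega
      have := ih (ml >>> 8) hlt
      simp only [this]
      have : 8 * ((ffLoop (ml >>> 8)).2 + 1) = 8 + 8 * (ffLoop (ml >>> 8)).2 := by ring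
      rw [this, List.replicate_add]
    · rw [ffLoop, if_neg h]; simp

theorem zfill_append (w : Nat) (xs : List Int) (b : Int) :
    zfillA (w+1) (xs ++ [b]) = zfillA w xs ++ [b] := by
  simp [zfillA]

theorem extP_zeros (w : Nat) : extP w 0 = List.replicate w 0 := by
  induction w with
  | zero => rfl
  | succ w ih => simp [extP, ih, List.replicate_succ']

theorem zfill_binStr_eq_extP (w : Nat) : ∀ n, 0 < w → bitLenB n ≤ w → zfillA w (binStr n) = extP w n := by
  induction w with
  | zero => intro n h; omega
  | succ w ih =>
    intro n _ hbl
    rcases Nat.lt_or_ge n 2 with h2 | h2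
    · interval_cases n
      · simp [binStr, zfillA, extP, extP_zeros]
      · simp [binStr, binRec, zfillA, extP, extP_zeros]
    · have hn : n ≠ 0 := by omega
      have hbl1 : bitLenB n = bitLenB (n/2) + 1 := bitLenB_pos_eq n (by omega)
      have hw : 0 < w := by
        have : 0 < bitLenB (n/2) := bitLenB_pos _ (by omega)
        omega
      have hb : binStr n = binStr (n/2) ++ [((n % 2 : Nat) : Int)] := by
        obtain ⟨m, rfl⟩ : ∃ m, n = m + 1 := ⟨n-1, by omega⟩
        have h1 : (m+1)/2 ≠ 0 := by omega
        simp [binStr, binRec, h1]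
      rw [hb, zfill_append, ih (n/2) hw (by omega)]
      rfl

theorem foldl_bound (l : List Char) : ∀ (acc w : Nat), acc < 2 ^ w → (∀ c ∈ l, c.toNat < 256) →
    l.foldl (fun a c => a * 256 + c.toNat) acc < 2 ^ (w + 8 * l.length) := by
  induction l with
  | nil => intro acc w h _; simpa using h
  | cons c l ih =>
    intro acc w h hc
    have h1 : acc * 256 + c.toNat < 2 ^ (w + 8) := by
      have := hc c (by simp)
      have hp : 2 ^ (w + 8) = 2 ^ w * 256 := by rw [pow_add]; norm_num
      have : acc * 256 + c.toNat < 2 ^ w * 256 := by nlinarith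
      omega
    have := ih (acc * 256 + c.toNat) (w + 8) h1 (fun x hx => hc x (by simp [hx]))
    have he : w + 8 + 8 * l.length = w + 8 * (c :: l).length := by simp; omega
    rw [he] at this
    simpa using this

theorem extP_split_gen (w2 : Nat) : ∀ (w1 a b : Nat), b < 2 ^ w2 →
    extP (w1 + w2) (a * 2 ^ w2 + b) = extP w1 a ++ extP w2 b := by
  induction w2 with
  | zero => intro w1 a b hb; interval_cases b; simp [extP]
  | succ w2 ih =>
    intro w1 a b hb
    have hp : 2 ^ (w2 + 1) = 2 * 2 ^ w2 := by ring
    have hq : w1 + (w2 + 1) = (w1 + w2) + 1 := by omega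
    rw [hq]
    show extP (w1 + w2) ((a * 2 ^ (w2+1) + b) / 2) ++ [(((a * 2 ^ (w2+1) + b) % 2 : Nat) : Int)] = _
    have hq2 : a * 2 ^ (w2+1) + b = 2 * (a * 2 ^ w2) + b := by rw [hp]; ring
    have hd : (a * 2 ^ (w2+1) + b) / 2 = a * 2 ^ w2 + b / 2 := by rw [hq2]; omega
    have hm : (a * 2 ^ (w2+1) + b) % 2 = b % 2 := by rw [hq2]; omega
    rw [hd, hm, ih w1 a (b/2) (by omega)]
    simp [extP]

theorem pow256 (k : Nat) : (256 : Nat) ^ k = 2 ^ (8 * k) := by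
  rw [show (256 : Nat) = 2 ^ 8 from rfl, ← pow_mul]

theorem extP_ones (m : Nat) : extP (8 * m) (256 ^ m - 1) = List.replicate (8 * m) 1 := by
  induction m with
  | zero => rfl
  | succ m ih =>
    have hsplit : (256 : Nat) ^ (m+1) - 1 = (256 ^ m - 1) * 2 ^ 8 + 255 := by
      have : (1:Nat) ≤ 256 ^ m := Nat.one_le_pow _ _ (by omega)
      have hp : (256:Nat) ^ (m+1) = 256 ^ m * 256 := by ring
      omega
    have hw : 8 * (m + 1) = 8 * m + 8 := by ring
    rw [hw, hsplit, extP_split_gen 8 (8*m) (256^m - 1) 255 (by norm_num), ih]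
    have h255 : extP 8 255 = List.replicate 8 1 := by decide
    rw [h255, ← List.replicate_add]

theorem extP_foldl (l : List Char) : ∀ (w acc : Nat), (∀ c ∈ l, c.toNat < 256) →
    extP (w + 8 * l.length) (l.foldl (fun a c => a * 256 + c.toNat) acc)
      = extP w acc ++ l.flatMap (fun c => extP 8 c.toNat) := by
  induction l with
  | nil => intro w acc _; simp
  | cons c l ih =>
    intro w acc h
    have hc : c.toNat < 256 := h c (by simp)
    have hw : w + 8 * (c :: l).length = (w + 8) + 8 * l.length := by simp; omega
    rw [hw, List.foldl_cons, ih (w + 8) (acc * 256 + c.toNat) (fun x hx => h x (by simp [hx]))]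
    have : extP (w + 8) (acc * 256 + c.toNat) = extP w acc ++ extP 8 c.toNat := by
      have := extP_split_gen 8 w acc c.toNat (by norm_num; omega)
      simpa using this
    rw [this]
    simp

theorem chars_ext (l : List Char) (h : ∀ c ∈ l, pvDomChar c = true) :
    l.flatMap (fun c => zfillA 8 (binStr c.toNat)) = l.flatMap (fun c => extP 8 c.toNat) := by
  induction l with
  | nil => rfl
  | cons c l ih =>
    have hc := h c (by simp)
    have hlt : c.toNat < 256 := by simp [pvDomChar] at hc; omega
    have hbl : bitLenB c.toNat ≤ 8 := bitLenB_le 8 c.toNat (by norm_num; omega)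
    simp only [List.flatMap_cons]
    rw [zfill_binStr_eq_extP 8 c.toNat (by omega) hbl, ih (fun x hx => h x (by simp [hx]))]

theorem foldl_from_acc (l : List Char) : ∀ acc : Nat,
    l.foldl (fun a c => a * 256 + c.toNat) acc
      = acc * 256 ^ l.length + l.foldl (fun a c => a * 256 + c.toNat) 0 := by
  induction l with
  | nil => intro acc; simp
  | cons c l ih =>
    intro acc
    simp only [List.foldl_cons, List.length_cons, Nat.zero_mul, Nat.zero_add]
    rw [ih (acc * 256 + c.toNat), ih c.toNat]
    ring

theorem packB_val (s : List Char) : ∀ d lo hi, hi - lo = d → lo < hi → hi ≤ s.length →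
    packB s lo hi = ((s.drop lo).take (hi - lo)).foldl (fun a c => a * 256 + c.toNat) 0 := by
  intro d
  induction d using Nat.strong_induction_on with
  | _ d ih =>
    intro lo hi hd hlh hhs
    by_cases h : lo + 1 < hi
    · rw [packB, dif_pos h]
      have hmid : lo < (lo + hi) / 2 ∧ (lo + hi) / 2 < hi := by omega
      have h1 := ih ((lo + hi) / 2 - lo) (by omega) lo ((lo + hi) / 2) rfl hmid.1 (by omega)
      have h2 := ih (hi - (lo + hi) / 2) (by omega) ((lo + hi) / 2) hi rfl hmid.2 hhs
      rw [h1, h2]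
      have hsplit : (s.drop lo).take (hi - lo)
          = (s.drop lo).take ((lo + hi) / 2 - lo) ++ (s.drop ((lo + hi) / 2)).take (hi - (lo + hi) / 2) := by
        have he : hi - lo = ((lo + hi) / 2 - lo) + (hi - (lo + hi) / 2) := by omega
        rw [he, List.take_add, List.drop_drop]
        have h3 : lo + ((lo + hi) / 2 - lo) = (lo + hi) / 2 := by omega
        rw [h3]
      rw [hsplit, List.foldl_append,
          foldl_from_acc ((s.drop ((lo + hi) / 2)).take (hi - (lo + hi) / 2))
            (((s.drop lo).take ((lo + hi) / 2 - lo)).foldl (fun a c => a * 256 + c.toNat) 0)]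
      have hlen : ((s.drop ((lo + hi) / 2)).take (hi - (lo + hi) / 2)).length = hi - (lo + hi) / 2 := by
        rw [List.length_take, List.length_drop]
        omega
      rw [hlen]
    · rw [packB, dif_neg h]
      have hhi : hi = lo + 1 := by omega
      have hone : (s.drop lo).take (hi - lo) = [s.getD lo default] := by
        rw [hhi]
        have hlt : lo < s.length := by omega
        have hdrop : s.drop lo = s[lo] :: s.drop (lo + 1) := List.drop_eq_getElem_cons hlt
        have h1 : lo + 1 - lo = 1 := by omega
        rw [h1, hdrop, List.take_succ_cons, List.take_zero, List.getD_eq_getElem s default hlt]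
      rw [hone]
      simp

-- ===== VERDICT (by name: the statement is the Claim_ definition above) =====
theorem messageToBits_spec : Claim_equal_messageToBits := by
  intro message hdom
  unfold Spec_messageToBits messageToBits messageToBits_alt
  simp only []
  set ml := message.toList.length with hml
  have hcs := ffLoop_count_spec ml
  set c := (ffLoop ml).2 with hc
  set n := max 1 ((bitLenB ml + 7) / 8) with hn
  have hnc : n = c + 1 := by omega
  have hchars : ∀ x ∈ message.toList, pvDomChar x = true := by
    have := hdom
    unfold Dom_messageToBits pvDomStr at this
    simpa [List.all_eq_true] using this
  have hlt : ∀ x ∈ message.toList, x.toNat < 256 := by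
    intro x hx
    have := hchars x hx
    simp [pvDomChar] at this
    omega
  have hmlsmall : ml < 2 ^ (8 * n) := by
    have h1 : bitLenB ml ≤ 8 * n := by omega
    have := bitLenB_lt ml
    calc ml < 2 ^ bitLenB ml := bitLenB_lt ml
      _ ≤ 2 ^ (8 * n) := Nat.pow_le_pow_right (by omega) h1
  have hacc0 : (256 ^ (n - 1) - 1) * 256 ^ n + ml < 2 ^ (8 * (n - 1) + 8 * n) := by
    have h1 : (256 : Nat) ^ (n - 1) - 1 < 2 ^ (8 * (n - 1)) := by
      rw [← pow256]
      have : (1:Nat) ≤ 256 ^ (n-1) := Nat.one_le_pow _ _ (by omega)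
      omega
    have hp : 2 ^ (8 * (n - 1) + 8 * n) = 2 ^ (8 * (n - 1)) * 2 ^ (8 * n) := by rw [pow_add]
    rw [hp, pow256 n, pow256 (n - 1)]
    have hsub : (2 ^ (8 * (n - 1)) - 1) * 2 ^ (8 * n)
        = 2 ^ (8 * (n - 1)) * 2 ^ (8 * n) - 2 ^ (8 * n) := by
      rw [Nat.sub_mul, one_mul]
    have hX : (1:Nat) ≤ 2 ^ (8 * (n - 1)) := Nat.one_le_pow _ _ (by omega)
    have hY : 2 ^ (8 * n) ≤ 2 ^ (8 * (n - 1)) * 2 ^ (8 * n) :=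
      Nat.le_mul_of_pos_left _ (by positivity)
    omega
  have haccfold : (if ml ≠ 0 then ((256 ^ (n - 1) - 1) * 256 ^ n + ml) * 256 ^ ml
          + packB message.toList 0 ml
        else (256 ^ (n - 1) - 1) * 256 ^ n + ml)
      = message.toList.foldl (fun a c => a * 256 + c.toNat)
          ((256 ^ (n - 1) - 1) * 256 ^ n + ml) := by
    by_cases hml0 : ml = 0
    · have : message.toList = [] := by
        rw [← List.length_eq_zero_iff, ← hml]; exact hml0
      simp [hml0, this]
    · rw [if_pos hml0, packB_val message.toList ml 0 ml rfl (by omega) (by omega)]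
      simp only [List.drop_zero]
      have htake : message.toList.take (ml - 0) = message.toList := by
        rw [Nat.sub_zero, hml, List.take_length]
      rw [htake, foldl_from_acc message.toList ((256 ^ (n - 1) - 1) * 256 ^ n + ml), ← hml]
  rw [haccfold]
  have haccbd := foldl_bound message.toList _ _ hacc0 hlt
  have hblacc : bitLenB (message.toList.foldl (fun a c => a * 256 + c.toNat)
      ((256 ^ (n - 1) - 1) * 256 ^ n + ml)) ≤ 8 * (2 * n - 1 + ml) := by
    apply bitLenB_le
    have he : 8 * (n - 1) + 8 * n + 8 * message.toList.length = 8 * (2 * n - 1 + ml) := by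
      rw [← hml]; omega
    rw [← he]
    exact haccbd
  rw [zfill_binStr_eq_extP (8 * (2 * n - 1 + ml)) _ (by omega) hblacc]
  have hwidth : 8 * (2 * n - 1 + ml) = (8 * (n - 1) + 8 * n) + 8 * ml := by omega
  rw [hwidth, show (8 : Nat) * ml = 8 * message.toList.length from by rw [hml],
      extP_foldl message.toList (8 * (n - 1) + 8 * n) _ hlt]
  have hsplit : extP (8 * (n - 1) + 8 * n) ((256 ^ (n - 1) - 1) * 256 ^ n + ml)
      = extP (8 * (n - 1)) (256 ^ (n - 1) - 1) ++ extP (8 * n) ml := by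
    rw [pow256 n]
    exact extP_split_gen (8 * n) (8 * (n - 1)) _ ml hmlsmall
  rw [hsplit, extP_ones]
  rw [ffLoop_bits ml, ← hc,
      zfill_binStr_eq_extP (8 * (c + 1)) ml (by omega) (by omega),
      chars_ext message.toList hchars]
  have hn1 : n - 1 = c := by omega
  rw [hn1, hnc]
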